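-- pv_equiv track=rewrite | github.com/IuLax790/Kattis | ModeratePace.py | find_median_distances
-- ===== SOURCE A (Python) =====
-- def find_median_distances(k, a, b):
--     """
--     Finds the median distance for each day given three runners' desired distances.
--
--     Args:
--       k: List of distances desired by the first runner.
--       a: List of distances desired by the second runner.
--       b: List of distances desired by the third runner.
--
--     Returns:
--       A list of median distances for each day.
--     """
--     n = len(k)
--     median_distances = []
--     for i in range(n):
--         distances = [k[i], a[i], b[i]]
--         distances.sort()
--         median_distances.append(distances[1])  # Select the middle value
--     return median_distances
-- ===== SOURCE B (Python) =====
-- def find_median_distances(k, a, b):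
--     """Median per day via comparison-based median-of-three over zipped lists (no sorting)."""
--     return [max(min(x, y), min(max(x, y), z)) for x, y, z in zip(k, a, b)]
-- ===== Notes on version B (the rewrite author's own statement) =====
-- stated objective: simpler
-- what changed: Replaces the index loop with per-day list build, sort and index by a single comprehension over zip(k,a,b) computing the median with three min/max comparisons.
import Mathlib
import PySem

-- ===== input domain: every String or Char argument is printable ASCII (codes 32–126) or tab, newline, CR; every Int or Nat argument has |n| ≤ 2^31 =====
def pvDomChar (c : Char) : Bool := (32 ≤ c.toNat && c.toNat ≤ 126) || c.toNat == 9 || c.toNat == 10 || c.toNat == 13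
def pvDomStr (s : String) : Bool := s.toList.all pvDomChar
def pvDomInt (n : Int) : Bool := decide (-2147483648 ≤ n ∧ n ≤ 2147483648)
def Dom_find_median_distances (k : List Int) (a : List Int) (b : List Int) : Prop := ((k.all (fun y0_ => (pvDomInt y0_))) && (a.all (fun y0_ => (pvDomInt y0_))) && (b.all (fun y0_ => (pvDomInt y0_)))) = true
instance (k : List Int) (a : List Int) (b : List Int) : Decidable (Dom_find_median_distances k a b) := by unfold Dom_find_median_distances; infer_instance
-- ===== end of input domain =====

-- B replaces the per-day build-sort-index with a single comprehension over zip(k,a,b)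
-- computing the median of three by min/max comparisons (objective: simpler).


-- ===== PORT A =====
def find_median_distances (k : List Int) (a : List Int) (b : List Int) : List Int :=
  let n : Int := (k.length : Int)
  (PySem.List.pyRange 0 n 1).foldl
    (fun median_distances i =>
      let distances : List Int :=
        [PySem.List.pyGetD k i 0, PySem.List.pyGetD a i 0, PySem.List.pyGetD b i 0]
      let distancesSorted := PySem.List.sorted distances (fun v => v) false
      median_distances ++ [PySem.List.pyGetD distancesSorted 1 0]) []

-- ===== PORT B =====
def find_median_distances_alt (k : List Int) (a : List Int) (b : List Int) : List Int :=
  (k.zip (a.zip b)).map (fun p => max (min p.1 p.2.1) (min (max p.1 p.2.1) p.2.2))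

-- ===== PRECONDITION & SPEC =====
-- Pre_ excludes exactly the inputs where a or b is shorter than k: there A raises IndexError.
def Pre_find_median_distances (k : List Int) (a : List Int) (b : List Int) : Prop :=
  k.length ≤ a.length ∧ k.length ≤ b.length
instance (k : List Int) (a : List Int) (b : List Int) : Decidable (Pre_find_median_distances k a b) := by unfold Pre_find_median_distances; infer_instance
def pvWitness_find_median_distances : List Int × List Int × List Int := ([3, 10], [1, 20], [2, 15])

def Spec_find_median_distances (k : List Int) (a : List Int) (b : List Int) (out : List Int) : Prop := out = find_median_distances_alt k a b
instance (k : List Int) (a : List Int) (b : List Int) (out : List Int) : Decidable (Spec_find_median_distances k a b out) := by unfold Spec_find_median_distances; infer_instance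

-- ===== CLAIM (what is proved, stated in full; the proofs are below) =====
def Claim_equal_find_median_distances : Prop := ∀ (k : List Int) (a : List Int) (b : List Int), Dom_find_median_distances k a b → Pre_find_median_distances k a b → Spec_find_median_distances k a b (find_median_distances k a b)

-- ===== LEMMAS AND PROOFS =====

-- the middle of the stable 3-element insertion sort is the comparison-based median of three
lemma med3 (x y z : Int) :
    PySem.List.pyGetD (PySem.List.sorted [x, y, z] (fun v => v) false) 1 0 =
      max (min x y) (min (max x y) z) := by
  simp only [PySem.List.sorted, List.foldl, PySem.List.insertBy.eq_1, PySem.List.insertBy.eq_2]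
  split_ifs <;>
    simp only [PySem.List.insertBy.eq_1, PySem.List.insertBy.eq_2] <;>
    split_ifs <;> simp_all [PySem.List.pyGetD] <;> omega

-- ===== VERDICT (by name: the statement is the Claim_ definition above) =====
theorem find_median_distances_spec : Claim_equal_find_median_distances := by
  intro k a b _ hpre
  obtain ⟨ha, hb⟩ := hpre
  unfold Spec_find_median_distances find_median_distances find_median_distances_alt
  simp only [PySem.List.foldl_append_singleton_eq_map
    (f := fun i => PySem.List.pyGetD
      (PySem.List.sorted [PySem.List.pyGetD k i 0, PySem.List.pyGetD a i 0, PySem.List.pyGetD b i 0]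
        (fun v => v) false) 1 0), List.nil_append]
  apply List.ext_getElem
  · simp [PySem.List.length_pyRange_one]
    omega
  · intro i hi1 hi2
    have hik : i < k.length := by
      simp [List.length_zip, List.length_map] at hi2
      omega
    have hL : ((PySem.List.pyRange 0 (k.length : Int) 1).map
        (fun j => PySem.List.pyGetD
          (PySem.List.sorted [PySem.List.pyGetD k j 0, PySem.List.pyGetD a j 0, PySem.List.pyGetD b j 0]
            (fun v => v) false) 1 0))[i]? = some (PySem.List.pyGetD
          (PySem.List.sorted [PySem.List.pyGetD k (i : Int) 0, PySem.List.pyGetD a (i : Int) 0, PySem.List.pyGetD b (i : Int) 0]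
            (fun v => v) false) 1 0) :=
      PySem.List.getElem?_map_pyRange_zero _ k.length i hik
    have hsome := List.getElem?_eq_getElem hi1
    rw [hsome] at hL
    rw [Option.some_inj.mp hL]
    rw [List.getElem_map, List.getElem_zip, List.getElem_zip]
    simp only [PySem.List.pyGetD_natCast]
    rw [List.getD_eq_getElem k 0 hik, List.getD_eq_getElem a 0 (by omega),
        List.getD_eq_getElem b 0 (by omega)]
    exact med3 _ _ _
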